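-- pv_equiv track=rewrite | github.com/catchthecow/PrintTreeMultipleNodes | display.py | find_first_and_last_non_empty_space_indices2
-- ===== SOURCE A (Python) =====
-- def find_first_and_last_non_empty_space_indices2(input_string):
--     first_non_empty_space = -1
--     last_non_empty_space = -1
--
--     for i, char in enumerate(input_string):
--         if char != ' ':
--             if first_non_empty_space == -1:
--                 first_non_empty_space = i
--             last_non_empty_space = i
--
--     return first_non_empty_space, last_non_empty_space
-- ===== SOURCE B (Python) =====
-- def find_first_and_last_non_empty_space_indices2(input_string):
--     first = -1
--     for i in range(len(input_string)):
--         if input_string[i] != ' ':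
--             first = i
--             break
--     last = -1
--     for i in range(len(input_string) - 1, -1, -1):
--         if input_string[i] != ' ':
--             last = i
--             break
--     return first, last
-- ===== Notes on version B (the rewrite author's own statement) =====
-- stated objective: faster
-- what changed: Replaces A's single accumulating pass over every character with two independent early-exit directional scans (left-to-right for the first non-space index, right-to-left for the last), which stop at the first hit instead of traversing the whole string.
import Mathlib
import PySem

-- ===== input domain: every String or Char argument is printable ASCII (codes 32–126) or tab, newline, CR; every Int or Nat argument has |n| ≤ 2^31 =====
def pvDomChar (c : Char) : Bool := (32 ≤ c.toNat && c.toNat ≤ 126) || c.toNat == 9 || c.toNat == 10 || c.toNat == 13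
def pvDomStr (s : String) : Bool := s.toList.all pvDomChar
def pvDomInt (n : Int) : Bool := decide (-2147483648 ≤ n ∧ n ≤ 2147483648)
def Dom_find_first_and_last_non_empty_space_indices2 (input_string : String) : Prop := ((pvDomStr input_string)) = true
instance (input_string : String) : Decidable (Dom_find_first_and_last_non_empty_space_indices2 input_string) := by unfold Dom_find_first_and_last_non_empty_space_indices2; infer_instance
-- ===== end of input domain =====

-- B replaces A's single accumulating forward pass with two independent early-exit
-- directional scans (left-to-right for the first index, right-to-left for the last).

-- ===== PORT A =====
-- the `for i, char in enumerate(...)` loop of A, carrying (first, last) state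
def pvLoopA (cs : List Char) (i : Int) (f l : Int) : Int × Int :=
  match cs with
  | [] => (f, l)
  | c :: t =>
    if c ≠ ' ' then pvLoopA t (i + 1) (if f = -1 then i else f) i
    else pvLoopA t (i + 1) f l

def find_first_and_last_non_empty_space_indices2 (input_string : String) : Int × Int :=
  pvLoopA input_string.toList 0 (-1) (-1)

-- ===== PORT B =====
-- B's first loop: scan forward, break at the first non-space (else -1)
def pvScanFirst (cs : List Char) (i : Int) : Int :=
  match cs with
  | [] => -1
  | c :: t => if c ≠ ' ' then i else pvScanFirst t (i + 1)

-- B's second loop: scan indices len-1 … 0, i.e. the reversed char list, break at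
-- the first non-space (else -1)
def pvScanLast (cs : List Char) (i : Int) : Int :=
  match cs with
  | [] => -1
  | c :: t => if c ≠ ' ' then i else pvScanLast t (i - 1)

def find_first_and_last_non_empty_space_indices2_alt (input_string : String) : Int × Int :=
  (pvScanFirst input_string.toList 0,
   pvScanLast input_string.toList.reverse ((input_string.toList.length : Int) - 1))

-- ===== PRECONDITION & SPEC =====
def Spec_find_first_and_last_non_empty_space_indices2 (input_string : String) (out : Int × Int) : Prop := out = find_first_and_last_non_empty_space_indices2_alt input_string
instance (input_string : String) (out : Int × Int) : Decidable (Spec_find_first_and_last_non_empty_space_indices2 input_string out) := by unfold Spec_find_first_and_last_non_empty_space_indices2; infer_instance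

-- ===== CLAIM (what is proved, stated in full; the proofs are below) =====
def Claim_equal_find_first_and_last_non_empty_space_indices2 : Prop := ∀ (input_string : String), Dom_find_first_and_last_non_empty_space_indices2 input_string → Spec_find_first_and_last_non_empty_space_indices2 input_string (find_first_and_last_non_empty_space_indices2 input_string)

-- ===== LEMMAS AND PROOFS =====

theorem pvLoopA_append (xs : List Char) (c : Char) (i f l : Int) :
    pvLoopA (xs ++ [c]) i f l =
      (let p := pvLoopA xs i f l;
       if c ≠ ' ' then ((if p.1 = -1 then i + (xs.length : Int) else p.1), i + (xs.length : Int))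
       else p) := by
  induction xs generalizing i f l with
  | nil => simp [pvLoopA]
  | cons x t ih =>
    simp only [List.cons_append, pvLoopA]
    by_cases hx : x = ' ' <;>
      simp only [hx, if_true, if_false, ne_eq, not_true_eq_false, not_false_eq_true, ih,
        List.length_cons] <;>
      · push_cast
        have h : i + 1 + (t.length : Int) = i + ((t.length : Int) + 1) := by ring
        rw [h]

theorem pvLoopA_fst (xs : List Char) (i f l : Int) (hi : 0 ≤ i) :
    (pvLoopA xs i f l).1 = if f = -1 then pvScanFirst xs i else f := by
  induction xs generalizing i f l with
  | nil => simp [pvLoopA, pvScanFirst]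
  | cons c t ih =>
    simp only [pvLoopA, pvScanFirst]
    by_cases hc : c = ' '
    · simp only [hc, ne_eq, not_true_eq_false, if_false]
      rw [ih _ _ _ (by omega)]
    · simp only [ne_eq, hc, not_false_eq_true, if_true]
      rw [ih _ _ _ (by omega)]
      by_cases hf : f = -1
      · simp [hf]; intro h; omega
      · simp [hf]

theorem pvLoopA_snd (xs : List Char) (i f : Int) :
    (pvLoopA xs i f (-1)).2 = pvScanLast xs.reverse (i + (xs.length : Int) - 1) := by
  induction xs using List.reverseRecOn generalizing i f with
  | nil => simp [pvLoopA, pvScanLast]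
  | append_singleton t c ih =>
    rw [pvLoopA_append]
    by_cases hc : c = ' '
    · simp only [hc, ne_eq, not_true_eq_false, if_false]
      rw [ih]
      simp only [List.reverse_append, List.reverse_cons, List.reverse_nil, List.nil_append,
        List.cons_append, pvScanLast, ne_eq, not_true_eq_false, if_false,
        List.length_append, List.length_cons, List.length_nil]
      congr 1
      push_cast
      ring
    · simp only [ne_eq, hc, not_false_eq_true, if_true]
      simp only [List.reverse_append, List.reverse_cons, List.reverse_nil, List.nil_append,
        List.cons_append, List.nil_append, pvScanLast, ne_eq, hc, not_false_eq_true, if_true,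
        List.length_append, List.length_cons, List.length_nil]
      push_cast
      ring

-- ===== VERDICT (by name: the statement is the Claim_ definition above) =====
theorem find_first_and_last_non_empty_space_indices2_spec : Claim_equal_find_first_and_last_non_empty_space_indices2 := by
  intro s _
  unfold Spec_find_first_and_last_non_empty_space_indices2
  unfold find_first_and_last_non_empty_space_indices2 find_first_and_last_non_empty_space_indices2_alt
  refine Prod.ext ?_ ?_
  · rw [pvLoopA_fst _ _ _ _ (le_refl 0)]; simp
  · rw [pvLoopA_snd]; simp
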